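-- pv_equiv track=rewrite | github.com/victor-bogdan/coauthorship-centrality | coauthorship_centrality/core/centrality/yearly_accumulative_centrality.py | build_node_groups_links
-- ===== SOURCE A (Python) =====
-- from itertools import combinations
--
-- def build_node_groups_links(node_groups):
--     collaborator_groups_links_set = set()
--     links_list = []
--
--     for first_collaborator_group_id, first_collaborator_group in node_groups.items():
--         for second_collaborator_group_id, second_collaborator_group in node_groups.items():
--             if first_collaborator_group_id == second_collaborator_group_id:
--                 continue
--
--             first_collaborator_group_authors_set = set(first_collaborator_group['members'])
--             second_collaborator_group_authors_set = set(second_collaborator_group['members'])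
--
--             if len(first_collaborator_group_authors_set.intersection(second_collaborator_group_authors_set)) > 0:
--                 for collaborator_group_link in combinations([
--                     first_collaborator_group_id,
--                     second_collaborator_group_id],
--                     2
--                 ):
--                     left_right = "{0} - {1}".format(collaborator_group_link[0], collaborator_group_link[1])
--                     right_left = "{0} - {1}".format(collaborator_group_link[1], collaborator_group_link[0])
--
--                     if left_right not in collaborator_groups_links_set and right_left not in collaborator_groups_links_set:
--                         collaborator_groups_links_set.add(left_right)
--                         links_list.append({"source": collaborator_group_link[0], "target": collaborator_group_link[1]})
--
--     return links_list
-- ===== SOURCE B (Python) =====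
-- from itertools import combinations
--
-- def build_node_groups_links(node_groups):
--     # Inverted index member -> positions of groups containing it; candidate
--     # pairs come from the buckets, so no all-pairs intersection scan is needed.
--     keys = []
--     member_index = {}
--     for pos, (group_id, group) in enumerate(node_groups.items()):
--         keys.append(group_id)
--         for member in group.get('members', []):
--             bucket = member_index.setdefault(member, [])
--             if not bucket or bucket[-1] != pos:
--                 bucket.append(pos)
--
--     candidate_pairs = set()
--     for bucket in member_index.values():
--         for pair in combinations(bucket, 2):
--             candidate_pairs.add(pair)
--
--     seen = set()
--     links_list = []
--     for i, j in sorted(candidate_pairs):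
--         left, right = keys[i], keys[j]
--         left_right = "{0} - {1}".format(left, right)
--         right_left = "{0} - {1}".format(right, left)
--         if left_right not in seen and right_left not in seen:
--             seen.add(left_right)
--             links_list.append({"source": left, "target": right})
--     return links_list
-- ===== Notes on version B (the rewrite author's own statement) =====
-- stated objective: faster
-- what changed: Replaces A's all-pairs nested loop with a per-pair set intersection by an inverted index member->group positions whose buckets directly generate the sharing position pairs, emitted in sorted position order (which equals A's discovery order).
import Mathlib
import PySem

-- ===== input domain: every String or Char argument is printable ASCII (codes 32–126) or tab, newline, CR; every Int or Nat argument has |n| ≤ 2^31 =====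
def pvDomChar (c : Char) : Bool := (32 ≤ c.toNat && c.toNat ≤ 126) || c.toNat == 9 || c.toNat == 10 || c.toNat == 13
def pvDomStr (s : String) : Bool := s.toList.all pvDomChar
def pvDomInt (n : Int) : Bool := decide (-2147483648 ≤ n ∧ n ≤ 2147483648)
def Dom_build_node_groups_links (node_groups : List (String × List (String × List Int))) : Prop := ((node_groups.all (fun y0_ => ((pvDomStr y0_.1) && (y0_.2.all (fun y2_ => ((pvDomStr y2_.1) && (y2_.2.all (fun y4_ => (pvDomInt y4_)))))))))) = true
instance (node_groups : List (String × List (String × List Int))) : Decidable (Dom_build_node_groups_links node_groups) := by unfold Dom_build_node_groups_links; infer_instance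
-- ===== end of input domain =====

-- B replaces A's all-pairs nested loop (set intersection per pair) by an inverted index
-- member -> group positions whose buckets generate exactly the sharing position pairs,
-- emitted in sorted position order (= A's discovery order); objective: faster.

-- ===== PORT A =====
def build_node_groups_links (node_groups : List (String × List (String × List Int))) : List (List (String × String)) :=
  let st := node_groups.foldl
    (fun st p =>
      node_groups.foldl
        (fun st q =>
          if p.1 == q.1 then st
          else
            let s1 := PySem.Set.ofList ((PySem.Dict.mk p.2).getD "members" [])
            let s2 := PySem.Set.ofList ((PySem.Dict.mk q.2).getD "members" [])
            if 0 < PySem.Set.len (PySem.Set.inter s1 s2) then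
              (PySem.List.combinations [p.1, q.1] 2).foldl
                (fun st c =>
                  let a := (PySem.List.pyGet? c 0).getD ""
                  let b := (PySem.List.pyGet? c 1).getD ""
                  let left_right := a ++ " - " ++ b
                  let right_left := b ++ " - " ++ a
                  if !(PySem.Set.contains st.1 left_right) && !(PySem.Set.contains st.1 right_left) then
                    (PySem.Set.add st.1 left_right, st.2 ++ [[("source", a), ("target", b)]])
                  else st)
                st
            else st)
        st)
    ((PySem.Set.empty : PySem.Set String), ([] : List (List (String × String))))
  st.2

-- ===== PORT B =====
def build_node_groups_links_alt (node_groups : List (String × List (String × List Int))) : List (List (String × String)) :=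
  -- inverted index: member -> ascending list of positions of groups containing it
  let st1 := node_groups.foldl
    (fun (st : Nat × List String × PySem.Dict Int (List Nat)) pg =>
      let pos := st.1
      let idx := ((PySem.Dict.mk pg.2).getD "members" []).foldl
        (fun idx m =>
          let idx1 := PySem.Dict.setdefault idx m []
          let bucket := PySem.Dict.getD idx1 m []
          if bucket.isEmpty || (PySem.List.pyGet? bucket (-1) != some pos) then
            PySem.Dict.insert idx1 m (bucket ++ [pos])
          else idx1)
        st.2.2
      (pos + 1, st.2.1 ++ [pg.1], idx))
    ((0 : Nat), ([] : List String), PySem.Dict.mk ([] : List (Int × List Nat)))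
  let keys := st1.2.1
  let pairs := (PySem.Dict.values st1.2.2).foldl
    (fun pairs bucket =>
      (PySem.List.combinations bucket 2).foldl
        (fun pairs c =>
          PySem.Set.add pairs ((PySem.List.pyGet? c 0).getD 0, (PySem.List.pyGet? c 1).getD 0))
        pairs)
    (PySem.Set.empty : PySem.Set (Nat × Nat))
  let st2 := (PySem.List.sorted2 pairs Prod.fst Prod.snd).foldl
    (fun st ij =>
      let left := keys.getD ij.1 ""
      let right := keys.getD ij.2 ""
      let left_right := left ++ " - " ++ right
      let right_left := right ++ " - " ++ left
      if !(PySem.Set.contains st.1 left_right) && !(PySem.Set.contains st.1 right_left) then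
        (PySem.Set.add st.1 left_right, st.2 ++ [[("source", left), ("target", right)]])
      else st)
    ((PySem.Set.empty : PySem.Set String), ([] : List (List (String × String))))
  st2.2

-- ===== PRECONDITION & SPEC =====
-- Pre_ excludes (a) association lists with duplicate outer or duplicate inner keys: the
-- Python argument is a dict, which cannot carry duplicate keys, so such lists do not
-- encode any Python input faithfully (the dict built from them collapses the duplicates);
-- and (b) inputs with ≥ 2 groups where some group lacks the "members" key, on which the
-- Python A raises KeyError.
def Pre_build_node_groups_links (node_groups : List (String × List (String × List Int))) : Prop :=
  (node_groups.map Prod.fst).Nodup ∧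
  (∀ g ∈ node_groups, (g.2.map Prod.fst).Nodup) ∧
  (2 ≤ node_groups.length → ∀ g ∈ node_groups, "members" ∈ g.2.map Prod.fst)
instance (node_groups : List (String × List (String × List Int))) : Decidable (Pre_build_node_groups_links node_groups) := by unfold Pre_build_node_groups_links; infer_instance

def pvWitness_build_node_groups_links : (List (String × List (String × List Int))) :=
  [("a", [("members", [1])]), ("b", [("members", [1, 2])])]

def Spec_build_node_groups_links (node_groups : List (String × List (String × List Int))) (out : List (List (String × String))) : Prop := out = build_node_groups_links_alt node_groups
instance (node_groups : List (String × List (String × List Int))) (out : List (List (String × String))) : Decidable (Spec_build_node_groups_links node_groups out) := by unfold Spec_build_node_groups_links; infer_instance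

-- ===== CLAIM (what is proved, stated in full; the proofs are below) =====
def Claim_equal_build_node_groups_links : Prop := ∀ (node_groups : List (String × List (String × List Int))), Dom_build_node_groups_links node_groups → Pre_build_node_groups_links node_groups → Spec_build_node_groups_links node_groups (build_node_groups_links node_groups)

-- ===== LEMMAS AND PROOFS =====

-- abbreviations for the common reference computation
def pvEntry (ng : List (String × List (String × List Int))) (i : Nat) : String × List (String × List Int) :=
  ng.getD i ("", [])
def pvKey (ng : List (String × List (String × List Int))) (i : Nat) : String := (pvEntry ng i).1
def pvMems (ng : List (String × List (String × List Int))) (i : Nat) : List Int :=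
  (PySem.Dict.mk (pvEntry ng i).2).getD "members" []
def pvShareB (ng : List (String × List (String × List Int))) (i j : Nat) : Bool :=
  (pvMems ng i).any (fun m => (pvMems ng j).contains m)
def pvEmit (ng : List (String × List (String × List Int)))
    (st : PySem.Set String × List (List (String × String))) (ij : Nat × Nat) :
    PySem.Set String × List (List (String × String)) :=
  let a := pvKey ng ij.1
  let b := pvKey ng ij.2
  let lr := a ++ " - " ++ b
  let rl := b ++ " - " ++ a
  if !(PySem.Set.contains st.1 lr) && !(PySem.Set.contains st.1 rl) then
    (PySem.Set.add st.1 lr, st.2 ++ [[("source", a), ("target", b)]])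
  else st
def pvStepA (ng : List (String × List (String × List Int)))
    (st : PySem.Set String × List (List (String × String))) (ij : Nat × Nat) :
    PySem.Set String × List (List (String × String)) :=
  if ij.1 = ij.2 then st else if pvShareB ng ij.1 ij.2 then pvEmit ng st ij else st
def pvLexRow (ng : List (String × List (String × List Int))) (i : Nat) : List (Nat × Nat) :=
  ((List.range ng.length).map (fun j => (i, j))).filter
    (fun ij => decide (ij.1 < ij.2) && pvShareB ng ij.1 ij.2)
def pvLexShare (ng : List (String × List (String × List Int))) : List (Nat × Nat) :=
  (List.range ng.length).flatMap (pvLexRow ng)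
def pvSt0 : PySem.Set String × List (List (String × String)) := (PySem.Set.empty, [])
def pvHit (ng : List (String × List (String × List Int))) (S : PySem.Set String) (i j : Nat) : Prop :=
  PySem.Set.contains S (pvKey ng i ++ " - " ++ pvKey ng j) = true ∨
  PySem.Set.contains S (pvKey ng j ++ " - " ++ pvKey ng i) = true

-- ---- generic helpers ----
lemma pv_map_getD_range {α : Type} (xs : List α) (d : α) :
    (List.range xs.length).map (fun i => xs.getD i d) = xs := by
  apply List.ext_getElem (by simp)
  intro i h1 h2
  simp [List.getD_eq_getElem?_getD, h2]

lemma pv_foldl_const {α β : Type} (l : List α) (f : β → α → β) (st : β)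
    (h : ∀ x ∈ l, f st x = st) : l.foldl f st = st := by
  induction l with
  | nil => rfl
  | cons x t ih =>
    rw [List.foldl_cons, h x (by simp)]
    exact ih (fun y hy => h y (by simp [hy]))

lemma pv_combinations_pair {α : Type} (a b : α) :
    PySem.List.combinations [a, b] 2 = [[a, b]] := by
  simp [PySem.List.combinations_cons_succ, PySem.List.combinations_one,
    PySem.List.combinations_nil_succ]

lemma pv_pair_sublist_iff {l : List Nat} (hl : l.Pairwise (· < ·)) (i j : Nat) :
    [i, j].Sublist l ↔ i ∈ l ∧ j ∈ l ∧ i < j := by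
  constructor
  · intro hs
    have hp := hl.sublist hs
    simp at hp
    exact ⟨hs.subset (by simp), hs.subset (by simp), hp⟩
  · rintro ⟨hi, hj, hij⟩
    induction l with
    | nil => simp at hi
    | cons x t ih =>
      rcases List.mem_cons.1 hi with rfl | hit
      · have hjt : j ∈ t := by
          rcases List.mem_cons.1 hj with rfl | h
          · omega
          · exact h
        exact (List.cons_sublist_cons ..).2 (List.singleton_sublist.2 hjt)
      · have hx : ∀ y ∈ t, x < y := by
          intro y hy; exact (List.pairwise_cons.1 hl).1 y hy
        have hjt : j ∈ t := by
          rcases List.mem_cons.1 hj with rfl | h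
          · exact absurd (hx i hit) (by omega)
          · exact h
        exact List.Sublist.cons x (ih (List.pairwise_cons.1 hl).2 hit hjt)

lemma pv_foldl_range {α β : Type} (xs : List α) (d : α) (f : β → α → β) (st : β) :
    xs.foldl f st = (List.range xs.length).foldl (fun st i => f st (xs.getD i d)) st := by
  conv_lhs => rw [← pv_map_getD_range xs d, List.foldl_map]

lemma pv_getD_lt {α : Type} (xs : List α) (d : α) (i : Nat) (hi : i < xs.length) :
    xs.getD i d = xs[i] := by
  simp [List.getD_eq_getElem?_getD, List.getElem?_eq_getElem hi]

-- ---- A side ----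
lemma pv_key_eq (ng : List (String × List (String × List Int)))
    (hnd : (ng.map Prod.fst).Nodup) (i j : Nat) (hi : i < ng.length) (hj : j < ng.length) :
    (pvKey ng i == pvKey ng j) = decide (i = j) := by
  have hk : ∀ t (ht : t < ng.length), pvKey ng t = (ng.map Prod.fst)[t]'(by simpa) := by
    intro t ht
    simp [pvKey, pvEntry, List.getD_eq_getElem?_getD, List.getElem?_eq_getElem ht]
  by_cases h : i = j
  · subst h; simp
  · have hne : pvKey ng i ≠ pvKey ng j := by
      rw [hk i hi, hk j hj]
      intro he
      exact h (hnd.getElem_inj_iff.1 he)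
    simp [h, hne]

lemma pv_share_iff0 (m1 m2 : List Int) :
    (0 < PySem.Set.len (PySem.Set.inter (PySem.Set.ofList m1) (PySem.Set.ofList m2))) ↔
      (m1.any (fun m => m2.contains m)) = true := by
  unfold PySem.Set.len
  rw [Int.natCast_pos, List.length_pos_iff_exists_mem]
  constructor
  · rintro ⟨x, hx⟩
    rw [PySem.Set.mem_inter] at hx
    simp only [PySem.Set.mem_ofList] at hx
    simp only [List.any_eq_true, List.contains_iff_mem]
    exact ⟨x, hx.1, hx.2⟩
  · intro h
    simp only [List.any_eq_true, List.contains_iff_mem] at h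
    obtain ⟨x, hx1, hx2⟩ := h
    exact ⟨x, (PySem.Set.mem_inter _ _ _).2 (by simp [PySem.Set.mem_ofList, hx1, hx2])⟩

lemma pv_share_iff (ng : List (String × List (String × List Int))) (i j : Nat) :
    (0 < PySem.Set.len (PySem.Set.inter (PySem.Set.ofList (pvMems ng i))
        (PySem.Set.ofList (pvMems ng j)))) ↔ pvShareB ng i j = true := by
  unfold pvShareB
  exact pv_share_iff0 _ _

lemma pv_comb_fold (ng : List (String × List (String × List Int))) (i j : Nat)
    (st : PySem.Set String × List (List (String × String))) :
    (PySem.List.combinations [pvKey ng i, pvKey ng j] 2).foldl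
      (fun st c =>
        let a := (PySem.List.pyGet? c 0).getD ""
        let b := (PySem.List.pyGet? c 1).getD ""
        let left_right := a ++ " - " ++ b
        let right_left := b ++ " - " ++ a
        if !(PySem.Set.contains st.1 left_right) && !(PySem.Set.contains st.1 right_left) then
          (PySem.Set.add st.1 left_right, st.2 ++ [[("source", a), ("target", b)]])
        else st)
      st = pvEmit ng st (i, j) := by
  rw [pv_combinations_pair]
  simp only [List.foldl_cons, List.foldl_nil, pvEmit]
  simp [PySem.List.pyGet?, PySem.List.pyIdx?]

lemma pvA_eq_fold (ng : List (String × List (String × List Int)))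
    (hnd : (ng.map Prod.fst).Nodup) :
    build_node_groups_links ng =
      (((List.range ng.length).flatMap
          (fun i => (List.range ng.length).map (fun j => (i, j)))).foldl (pvStepA ng) pvSt0).2 := by
  unfold build_node_groups_links
  rw [List.foldl_flatMap]
  simp only [List.foldl_map]
  rw [pv_foldl_range ng ("", []) _ _]
  congr 1
  apply PySem.List.foldl_congr_mem
  intro st i hi
  rw [pv_foldl_range ng ("", []) _ _]
  apply PySem.List.foldl_congr_mem
  intro st' j hj
  rw [List.mem_range] at hi hj
  show _ = pvStepA ng st' (i, j)
  have hpq : ng.getD i ("", []) = pvEntry ng i ∧ ng.getD j ("", []) = pvEntry ng j := ⟨rfl, rfl⟩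
  rw [hpq.1, hpq.2]
  unfold pvStepA
  simp only []
  rw [show (pvEntry ng i).1 = pvKey ng i from rfl, show (pvEntry ng j).1 = pvKey ng j from rfl,
    pv_key_eq ng hnd i j hi hj]
  by_cases h : i = j
  · simp [h]
  · simp only [h, decide_false, Bool.false_eq_true, if_false]
    simp only [show ∀ t : Nat, (PySem.Dict.mk (pvEntry ng t).2).getD "members" [] = pvMems ng t
      from fun _ => rfl]
    by_cases hs : pvShareB ng i j = true
    · rw [if_pos ((pv_share_iff ng i j).2 hs), if_pos hs]
      exact pv_comb_fold ng i j st'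
    · rw [if_neg (fun hc => hs ((pv_share_iff ng i j).1 hc)), if_neg hs]

lemma pvEmit_mono (ng : List (String × List (String × List Int))) (st : PySem.Set String × List (List (String × String)))
    (ij : Nat × Nat) (x : String) (hx : PySem.Set.contains st.1 x = true) :
    PySem.Set.contains (pvEmit ng st ij).1 x = true := by
  unfold pvEmit
  rw [PySem.Set.contains_iff] at hx
  by_cases h : (!(PySem.Set.contains st.1 (pvKey ng ij.1 ++ " - " ++ pvKey ng ij.2)) &&
      !(PySem.Set.contains st.1 (pvKey ng ij.2 ++ " - " ++ pvKey ng ij.1))) = true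
  · simp only [h, if_pos]
    rw [PySem.Set.contains_iff, PySem.Set.mem_add]
    exact Or.inl hx
  · simp only [h, Bool.false_eq_true]
    rw [PySem.Set.contains_iff]
    exact hx

lemma pvEmit_fold_mono (ng : List (String × List (String × List Int))) (l : List (Nat × Nat))
    (st : PySem.Set String × List (List (String × String))) (x : String)
    (hx : PySem.Set.contains st.1 x = true) :
    PySem.Set.contains (l.foldl (pvEmit ng) st).1 x = true := by
  induction l generalizing st with
  | nil => exact hx
  | cons y t ih => exact ih _ (pvEmit_mono ng st y x hx)

lemma pvHit_emit_self (ng : List (String × List (String × List Int)))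
    (st : PySem.Set String × List (List (String × String))) (ij : Nat × Nat) :
    pvHit ng (pvEmit ng st ij).1 ij.1 ij.2 := by
  unfold pvHit pvEmit
  by_cases h : (!(PySem.Set.contains st.1 (pvKey ng ij.1 ++ " - " ++ pvKey ng ij.2)) &&
      !(PySem.Set.contains st.1 (pvKey ng ij.2 ++ " - " ++ pvKey ng ij.1))) = true
  · simp only [h, if_pos]
    left
    rw [PySem.Set.contains_iff, PySem.Set.mem_add]
    exact Or.inr rfl
  · simp only [h, Bool.false_eq_true]
    by_cases h1 : PySem.Set.contains st.1 (pvKey ng ij.1 ++ " - " ++ pvKey ng ij.2) = true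
    · exact Or.inl h1
    · by_cases h2 : PySem.Set.contains st.1 (pvKey ng ij.2 ++ " - " ++ pvKey ng ij.1) = true
      · exact Or.inr h2
      · exfalso
        apply h
        simp only [Bool.not_eq_true] at h1 h2
        simp only [Bool.and_eq_true, Bool.not_eq_true', h1, h2, and_self]

lemma pvHit_mono (ng : List (String × List (String × List Int))) (l : List (Nat × Nat))
    (st : PySem.Set String × List (List (String × String))) (i j : Nat)
    (h : pvHit ng st.1 i j) : pvHit ng ((l.foldl (pvEmit ng) st).1) i j := by
  rcases h with h | h
  · exact Or.inl (pvEmit_fold_mono ng l st _ h)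
  · exact Or.inr (pvEmit_fold_mono ng l st _ h)

lemma pvHit_of_mem_fold (ng : List (String × List (String × List Int))) (l : List (Nat × Nat))
    (st : PySem.Set String × List (List (String × String))) (ij : Nat × Nat) (hmem : ij ∈ l) :
    pvHit ng ((l.foldl (pvEmit ng) st).1) ij.1 ij.2 := by
  induction l generalizing st with
  | nil => simp at hmem
  | cons y t ih =>
    rcases List.mem_cons.1 hmem with rfl | hmem'
    · exact pvHit_mono ng t _ ij.1 ij.2 (pvHit_emit_self ng st ij)
    · exact ih _ hmem'

lemma pvShareB_symm (ng : List (String × List (String × List Int))) (i j : Nat)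
    (h : pvShareB ng i j = true) : pvShareB ng j i = true := by
  simp only [pvShareB, List.any_eq_true, List.contains_iff_mem] at h ⊢
  obtain ⟨x, h1, h2⟩ := h
  exact ⟨x, h2, h1⟩

lemma pvEmit_noop (ng : List (String × List (String × List Int)))
    (st : PySem.Set String × List (List (String × String))) (i j : Nat)
    (h : pvHit ng st.1 i j) : pvEmit ng st (i, j) = st := by
  unfold pvEmit
  have hc : (!(PySem.Set.contains st.1 (pvKey ng i ++ " - " ++ pvKey ng j)) &&
      !(PySem.Set.contains st.1 (pvKey ng j ++ " - " ++ pvKey ng i))) = false := by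
    rcases h with h | h
    · simp only [h, Bool.not_true, Bool.false_and]
    · simp only [h, Bool.not_true, Bool.and_false]
  simp only [hc, Bool.false_eq_true, if_false]

lemma pvRow_lemma (ng : List (String × List (String × List Int))) (m : Nat)
    (hm : m < ng.length)
    (stL : PySem.Set String × List (List (String × String)))
    (hinv : ∀ j k, j < m → k < ng.length → j ≠ k → pvShareB ng j k = true →
      pvHit ng stL.1 j k) :
    (List.range ng.length).foldl (fun st j => pvStepA ng st (m, j)) stL =
      (pvLexRow ng m).foldl (pvEmit ng) stL := by
  have hsplit : ng.length = (m + 1) + (ng.length - (m + 1)) := by omega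
  have hrange : List.range ng.length =
      List.range (m + 1) ++ (List.range (ng.length - (m + 1))).map ((m + 1) + ·) := by
    conv_lhs => rw [hsplit]
    exact List.range_add
  rw [hrange, List.foldl_append]
  -- prefix is a no-op
  rw [pv_foldl_const _ _ stL ?hpre]
  case hpre =>
    intro j hjm
    rw [List.mem_range] at hjm
    by_cases hje : m = j
    · simp [pvStepA, hje]
    · have hjm' : j < m := by omega
      unfold pvStepA
      rw [if_neg hje]
      by_cases hs : pvShareB ng m j = true
      · rw [if_pos hs]
        exact pvEmit_noop ng stL m j
          (Or.symm (hinv j m hjm' hm (by omega) (pvShareB_symm ng m j hs)))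
      · rw [if_neg hs]
  -- suffix emits the sharing pairs
  rw [List.foldl_map]
  have hcong : ∀ (st : PySem.Set String × List (List (String × String))) j,
      j ∈ List.range (ng.length - (m + 1)) →
      pvStepA ng st (m, (m + 1) + j) =
        if pvShareB ng m ((m + 1) + j) = true then pvEmit ng st (m, (m + 1) + j) else st := by
    intro st j _
    unfold pvStepA
    rw [if_neg (by omega : ¬ (m, (m + 1) + j).1 = (m, (m + 1) + j).2)]
  rw [PySem.List.foldl_congr_mem
    (l := List.range (ng.length - (m + 1)))
    (f := fun st j => pvStepA ng st (m, (m + 1) + j))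
    (g := fun st j => if pvShareB ng m ((m + 1) + j) = true then pvEmit ng st (m, (m + 1) + j) else st)
    (init := stL) hcong]
  rw [PySem.List.foldl_ite_eq_foldl_filter (fun j => pvShareB ng m ((m + 1) + j) = true)
    (fun st j => pvEmit ng st (m, (m + 1) + j))]
  rw [show (fun st j => pvEmit ng st (m, (m + 1) + j)) =
    (fun st j => pvEmit ng st ((fun j => (m, (m + 1) + j)) j)) from rfl, ← List.foldl_map]
  congr 1
  -- pvLexRow m is exactly that filtered, shifted list
  unfold pvLexRow
  rw [List.filter_map, hrange]
  simp only [List.filter_append, List.filter_map]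
  have h1 : (List.range (m + 1)).filter
      ((fun ij => decide (ij.1 < ij.2) && pvShareB ng ij.1 ij.2) ∘ (fun j => (m, j))) = [] := by
    apply List.filter_eq_nil_iff.2
    intro j hj
    rw [List.mem_range] at hj
    simp only [Function.comp_apply, Bool.and_eq_true, decide_eq_true_eq]
    intro hc
    omega
  rw [h1]
  simp only [List.nil_append, List.map_map]
  congr 1
  apply List.filter_congr
  intro j _
  simp only [Function.comp_apply]
  have : m < (m + 1) + j := by omega
  simp [this]

-- the crux: A's full double loop equals the emit-fold over the lex-ordered sharing pairs
lemma pvA_rows (ng : List (String × List (String × List Int))) :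
    ∀ m ≤ ng.length,
      (((List.range m).flatMap
          (fun i => (List.range ng.length).map (fun j => (i, j)))).foldl (pvStepA ng) pvSt0 =
        ((List.range m).flatMap (pvLexRow ng)).foldl (pvEmit ng) pvSt0) ∧
      (∀ j k, j < m → k < ng.length → j ≠ k → pvShareB ng j k = true →
        pvHit ng (((List.range m).flatMap (pvLexRow ng)).foldl (pvEmit ng) pvSt0).1 j k) := by
  intro m
  induction m with
  | zero => exact fun _ => ⟨rfl, fun j k hj _ _ _ => absurd hj (by omega)⟩
  | succ m ih =>
    intro hm1
    have hm : m < ng.length := by omega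
    obtain ⟨heq, hinv⟩ := ih (by omega)
    constructor
    · rw [List.range_succ, List.flatMap_append, List.foldl_append,
        List.flatMap_append, List.foldl_append, heq]
      simp only [List.flatMap_singleton, List.foldl_map]
      exact pvRow_lemma ng m hm _ hinv
    · intro j k hj hk hjk hs
      rw [List.range_succ, List.flatMap_append, List.foldl_append]
      simp only [List.flatMap_singleton]
      by_cases hjm : j < m
      · exact pvHit_mono ng _ _ j k (hinv j k hjm hk hjk hs)
      · have hjm' : j = m := by omega
        subst hjm'
        by_cases hkm : j < k
        · apply pvHit_of_mem_fold ng (pvLexRow ng j) _ (j, k)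
          unfold pvLexRow
          rw [List.mem_filter]
          refine ⟨List.mem_map.2 ⟨k, List.mem_range.2 hk, rfl⟩, ?_⟩
          simp [hkm, hs]
        · have hkm' : k < j := by omega
          exact pvHit_mono ng _ _ j k
            (Or.symm (hinv k j hkm' hm (by omega) (pvShareB_symm ng j k hs)))

-- ---- B side ----
def pvIstep (pos : Nat) (idx : PySem.Dict Int (List Nat)) (m : Int) : PySem.Dict Int (List Nat) :=
  if (PySem.Dict.getD (PySem.Dict.setdefault idx m []) m []).isEmpty ||
      (PySem.List.pyGet? (PySem.Dict.getD (PySem.Dict.setdefault idx m []) m []) (-1) != some pos) then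
    PySem.Dict.insert (PySem.Dict.setdefault idx m []) m
      (PySem.Dict.getD (PySem.Dict.setdefault idx m []) m [] ++ [pos])
  else PySem.Dict.setdefault idx m []

def pvGstep (st : Nat × List String × PySem.Dict Int (List Nat))
    (pg : String × List (String × List Int)) : Nat × List String × PySem.Dict Int (List Nat) :=
  (st.1 + 1, st.2.1 ++ [pg.1], ((PySem.Dict.mk pg.2).getD "members" []).foldl (pvIstep st.1) st.2.2)

def pvAddPairs (pairs : PySem.Set (Nat × Nat)) (bucket : List Nat) : PySem.Set (Nat × Nat) :=
  (PySem.List.combinations bucket 2).foldl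
    (fun pairs c =>
      PySem.Set.add pairs ((PySem.List.pyGet? c 0).getD 0, (PySem.List.pyGet? c 1).getD 0))
    pairs

lemma pv_pyGet_neg1 {α : Type} (l : List α) : PySem.List.pyGet? l (-1) = l.getLast? := by
  rcases l with _ | ⟨x, t⟩
  · rfl
  · simp only [PySem.List.pyGet?, PySem.List.pyIdx?, List.length_cons,
      List.getLast?_eq_getElem?]
    norm_num

lemma pv_cond (bucket : List Nat) (pos : Nat) :
    (bucket.isEmpty || (PySem.List.pyGet? bucket (-1) != some pos)) =
      decide (bucket.getLast? ≠ some pos) := by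
  rw [pv_pyGet_neg1]
  rcases bucket with _ | ⟨x, t⟩
  · simp
  · simp only [List.isEmpty_cons, Bool.false_or, bne]
    rcases h : (x :: t).getLast? with _ | y
    · simp at h
    · by_cases hy : y = pos
      · simp [hy]
      · simp [hy]

lemma pv_setdefault_getD (d : PySem.Dict Int (List Nat)) (k m : Int) :
    (d.setdefault k []).getD m [] = d.getD m [] := by
  unfold PySem.Dict.setdefault
  by_cases h : d.contains k = true
  · rw [if_pos h]
  · rw [if_neg h]
    show (PySem.Dict.mk (d.items ++ [(k, [])])).getD m [] = d.getD m []
    unfold PySem.Dict.getD PySem.Dict.get?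
    simp only [List.find?_append]
    rcases hf : d.items.find? (fun p => p.1 == m) with _ | v <;> rw [hf]
    · by_cases hk : m = k
      · subst hk
        simp [List.find?]
      · simp [List.find?, show (k == m) = false from by simp [Ne.symm hk]]
    · rfl

lemma pv_setdefault_keys (d : PySem.Dict Int (List Nat)) (k : Int) (v : List Nat)
    (h : d.keys.Nodup) : (d.setdefault k v).keys.Nodup := by
  unfold PySem.Dict.setdefault
  by_cases hc : d.contains k = true
  · rw [if_pos hc]; exact h
  · rw [if_neg hc]
    have hk : k ∉ d.keys := by
      intro hm
      exact hc ((PySem.Dict.contains_iff_mem_keys _ _).2 hm)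
    have hkeys : (PySem.Dict.mk (d.items ++ [(k, v)])).keys = d.keys ++ [k] := by
      simp [PySem.Dict.keys]
    rw [hkeys]
    refine List.Nodup.append h (List.nodup_singleton k) ?_
    intro a ha hb
    rw [List.mem_singleton] at hb
    exact hk (hb ▸ ha)

lemma pv_istep_keys (pos : Nat) (d : PySem.Dict Int (List Nat)) (m : Int)
    (h : d.keys.Nodup) : (pvIstep pos d m).keys.Nodup := by
  unfold pvIstep
  have h1 := pv_setdefault_keys d m [] h
  split
  · exact PySem.Dict.nodup_keys_insert _ _ _ h1
  · exact h1

lemma pv_foldl_istep_keys (pos : Nat) (ms : List Int) :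
    ∀ d : PySem.Dict Int (List Nat), d.keys.Nodup → (ms.foldl (pvIstep pos) d).keys.Nodup := by
  induction ms with
  | nil => exact fun d h => h
  | cons a tl ih => exact fun d h => ih _ (pv_istep_keys pos d a h)

lemma pv_istep_getD (pos : Nat) (d : PySem.Dict Int (List Nat)) (m0 m : Int) :
    (pvIstep pos d m0).getD m [] =
      if m = m0 ∧ (d.getD m0 []).getLast? ≠ some pos then d.getD m0 [] ++ [pos]
      else d.getD m [] := by
  unfold pvIstep
  rw [pv_setdefault_getD, pv_cond]
  by_cases hl : (d.getD m0 []).getLast? ≠ some pos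
  · rw [if_pos (by simpa using hl)]
    rw [PySem.Dict.getD_insert]
    by_cases hm : m = m0
    · simp [hm, hl]
    · simp [hm, hl, pv_setdefault_getD]
  · rw [if_neg (by simpa using hl)]
    rw [pv_setdefault_getD]
    simp [hl]

lemma pvInner (pos : Nat) (ms : List Int) :
    ∀ (d : PySem.Dict Int (List Nat)),
      (∀ (m : Int) (x : Nat), x ∈ d.getD m [] → x ≤ pos) →
      ∀ m : Int, (ms.foldl (pvIstep pos) d).getD m [] =
        d.getD m [] ++
          (if m ∈ ms ∧ (d.getD m []).getLast? ≠ some pos then [pos] else []) := by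
  induction ms with
  | nil => intro d _ m; simp
  | cons m0 tl ih =>
    intro d hb m
    rw [List.foldl_cons]
    have hd' : ∀ m' : Int, (pvIstep pos d m0).getD m' [] =
        if m' = m0 ∧ (d.getD m0 []).getLast? ≠ some pos then d.getD m0 [] ++ [pos]
        else d.getD m' [] := fun m' => pv_istep_getD pos d m0 m'
    have hb' : ∀ (m' : Int) (x : Nat), x ∈ (pvIstep pos d m0).getD m' [] → x ≤ pos := by
      intro m' x hx
      rw [hd'] at hx
      by_cases hc : m' = m0 ∧ (d.getD m0 []).getLast? ≠ some pos
      · rw [if_pos hc] at hx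
        rcases List.mem_append.1 hx with hx | hx
        · exact hb _ _ hx
        · simp at hx; omega
      · rw [if_neg hc] at hx
        exact hb _ _ hx
    rw [ih _ hb' m, hd' m]
    by_cases hm : m = m0
    · subst hm
      by_cases hl : (d.getD m []).getLast? ≠ some pos
      · rw [if_pos ⟨rfl, hl⟩]
        have h2 : ¬ (m ∈ tl ∧ ((d.getD m [] ++ [pos]).getLast? ≠ some pos)) := by
          simp
        rw [if_neg h2, if_pos ⟨by simp, hl⟩]
        simp
      · rw [not_not] at hl
        simp [hl]
    · rw [if_neg (by simp [hm])]
      congr 1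
      by_cases hmt : m ∈ tl
      · simp [hm, hmt]
      · simp [hm, hmt]

lemma pv_shift_map (p0 : Nat) (l : List Nat) :
    (l.map Nat.succ).map (fun x => p0 + x) = l.map (fun x => (p0 + 1) + x) := by
  rw [List.map_map]
  apply List.map_congr_left
  intro t _
  simp only [Function.comp_apply]
  omega

lemma pvOuter (ng : List (String × List (String × List Int))) :
    ∀ (p0 : Nat) (ks0 : List String) (d0 : PySem.Dict Int (List Nat)),
      (∀ (m : Int) (x : Nat), x ∈ d0.getD m [] → x < p0) → d0.keys.Nodup →
      (ng.foldl pvGstep (p0, ks0, d0)).2.1 = ks0 ++ ng.map Prod.fst ∧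
      (ng.foldl pvGstep (p0, ks0, d0)).2.2.keys.Nodup ∧
      (∀ m : Int, (ng.foldl pvGstep (p0, ks0, d0)).2.2.getD m [] =
        d0.getD m [] ++
          ((List.range ng.length).filter
            (fun t => decide (m ∈ (PySem.Dict.mk (ng.getD t ("", [])).2).getD "members" []))).map
            (fun x => p0 + x)) := by
  induction ng with
  | nil => intro p0 ks0 d0 _ hnd; exact ⟨by simp, hnd, by simp⟩
  | cons g rest ih =>
    intro p0 ks0 d0 hb hnd
    rw [List.foldl_cons]
    have hstep : pvGstep (p0, ks0, d0) g =
        (p0 + 1, ks0 ++ [g.1], ((PySem.Dict.mk g.2).getD "members" []).foldl (pvIstep p0) d0) := rfl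
    rw [hstep]
    have hd1 : ∀ m : Int, (((PySem.Dict.mk g.2).getD "members" []).foldl (pvIstep p0) d0).getD m [] =
        d0.getD m [] ++ (if m ∈ (PySem.Dict.mk g.2).getD "members" [] then [p0] else []) := by
      intro m
      rw [pvInner p0 _ d0 (fun m x hx => le_of_lt (hb m x hx)) m]
      congr 1
      have hlast : (d0.getD m []).getLast? ≠ some p0 := by
        intro hsome
        have := List.mem_of_getLast? hsome
        exact absurd (hb m p0 this) (by omega)
      simp [hlast]
    have hd1nd : (((PySem.Dict.mk g.2).getD "members" []).foldl (pvIstep p0) d0).keys.Nodup :=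
      pv_foldl_istep_keys p0 _ d0 hnd
    have hb1 : ∀ (m : Int) (x : Nat),
        x ∈ (((PySem.Dict.mk g.2).getD "members" []).foldl (pvIstep p0) d0).getD m [] →
          x < p0 + 1 := by
      intro m x hx
      rw [hd1 m] at hx
      rcases List.mem_append.1 hx with hx | hx
      · have := hb m x hx; omega
      · by_cases h : m ∈ (PySem.Dict.mk g.2).getD "members" []
        · simp [h] at hx; omega
        · simp [h] at hx
    obtain ⟨hk, hn, hgd⟩ := ih (p0 + 1) (ks0 ++ [g.1]) _ hb1 hd1nd
    refine ⟨by simpa using hk, hn, ?_⟩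
    intro m
    rw [hgd m, hd1 m, List.append_assoc]
    congr 1
    rw [List.length_cons, List.range_succ_eq_map, List.filter_cons]
    simp only [List.getD_cons_zero, List.filter_map]
    have hcomp : ((fun t => decide (m ∈ (PySem.Dict.mk ((g :: rest).getD t ("", [])).2).getD "members" [])) ∘ Nat.succ)
        = (fun t => decide (m ∈ (PySem.Dict.mk (rest.getD t ("", [])).2).getD "members" [])) := by
      funext t
      simp [Function.comp_apply]
    rw [hcomp]
    by_cases hg : m ∈ (PySem.Dict.mk g.2).getD "members" []
    · rw [if_pos hg, if_pos (by simpa using hg)]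
      rw [List.map_cons, pv_shift_map]
      rfl
    · rw [if_neg hg, if_neg (by simpa using hg)]
      rw [pv_shift_map]
      simp

lemma pv_mem_foldl_add2 {α β : Type} (l : List α) (g : α → List β) (f : β → Nat × Nat)
    (s : PySem.Set (Nat × Nat)) (y : Nat × Nat) :
    y ∈ l.foldl (fun s a => (g a).foldl (fun s b => PySem.Set.add s (f b)) s) s ↔
      y ∈ s ∨ ∃ a ∈ l, ∃ b ∈ g a, y = f b := by
  induction l generalizing s with
  | nil => simp
  | cons a tl ih =>
    rw [List.foldl_cons, ih, PySem.Set.mem_foldl_add]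
    constructor
    · rintro (⟨h | ⟨b, hb, rfl⟩⟩ | ⟨a', ha', b, hb, rfl⟩)
      · exact Or.inl h
      · exact Or.inr ⟨a, by simp, b, hb, rfl⟩
      · exact Or.inr ⟨a', by simp [ha'], b, hb, rfl⟩
    · rintro (h | ⟨a', ha', b, hb, rfl⟩)
      · exact Or.inl (Or.inl h)
      · rcases List.mem_cons.1 ha' with rfl | ha''
        · exact Or.inl (Or.inr ⟨b, hb, rfl⟩)
        · exact Or.inr ⟨a', ha'', b, hb, rfl⟩

lemma pv_foldl_add_nodup {β : Type} (l : List β) (f : β → Nat × Nat) (s : PySem.Set (Nat × Nat))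
    (h : s.Nodup) : (l.foldl (fun s b => PySem.Set.add s (f b)) s).Nodup := by
  induction l generalizing s with
  | nil => exact h
  | cons b tl ih => exact ih _ (PySem.Set.nodup_add _ _ h)

lemma pv_addPairs_nodup (l : List (List Nat)) (s : PySem.Set (Nat × Nat)) (h : s.Nodup) :
    (l.foldl pvAddPairs s).Nodup := by
  induction l generalizing s with
  | nil => exact h
  | cons b tl ih => exact ih _ (pv_foldl_add_nodup _ _ _ h)

def pvLexLt (a b : Nat × Nat) : Prop := a.1 < b.1 ∨ (a.1 = b.1 ∧ a.2 < b.2)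

lemma pv_row_elim (ng : List (String × List (String × List Int))) (i : Nat) (a : Nat × Nat)
    (h : a ∈ pvLexRow ng i) :
    a.1 = i ∧ a.2 < ng.length ∧ i < a.2 ∧ pvShareB ng i a.2 = true := by
  unfold pvLexRow at h
  rw [List.mem_filter] at h
  obtain ⟨hm, hcond⟩ := h
  obtain ⟨j, hj, rfl⟩ := List.mem_map.1 hm
  rw [List.mem_range] at hj
  simp only [Bool.and_eq_true, decide_eq_true_eq] at hcond
  exact ⟨rfl, hj, hcond.1, hcond.2⟩

lemma pv_lexShare_pairwise (ng : List (String × List (String × List Int))) :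
    (pvLexShare ng).Pairwise pvLexLt := by
  unfold pvLexShare
  have key : ∀ k : Nat, ((List.range k).flatMap (pvLexRow ng)).Pairwise pvLexLt := by
    intro k
    induction k with
    | zero => simp
    | succ k ih =>
      rw [List.range_succ, List.flatMap_append, List.flatMap_singleton, List.pairwise_append]
      refine ⟨ih, ?_, ?_⟩
      · unfold pvLexRow
        have hmap : ((List.range ng.length).map (fun j => (k, j))).Pairwise pvLexLt := by
          rw [List.pairwise_map]
          exact List.pairwise_lt_range.imp (fun hab => Or.inr ⟨rfl, hab⟩)
        exact hmap.sublist List.filter_sublist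
      · intro a ha b hb
        obtain ⟨i, hi, hai⟩ := List.mem_flatMap.1 ha
        rw [List.mem_range] at hi
        have h1 := (pv_row_elim ng i a hai).1
        have h2 := (pv_row_elim ng k b hb).1
        exact Or.inl (by omega)
  exact key ng.length

lemma pv_mem_lexShare (ng : List (String × List (String × List Int))) (ij : Nat × Nat) :
    ij ∈ pvLexShare ng ↔
      ij.1 < ij.2 ∧ ij.2 < ng.length ∧ pvShareB ng ij.1 ij.2 = true := by
  unfold pvLexShare
  rw [List.mem_flatMap]
  constructor
  · rintro ⟨i, hi, hmem⟩
    obtain ⟨h1, h2, h3, h4⟩ := pv_row_elim ng i ij hmem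
    subst h1
    exact ⟨h3, h2, h4⟩
  · rintro ⟨h1, h2, h3⟩
    refine ⟨ij.1, List.mem_range.2 (by omega), ?_⟩
    unfold pvLexRow
    rw [List.mem_filter]
    refine ⟨List.mem_map.2 ⟨ij.2, List.mem_range.2 h2, rfl⟩, ?_⟩
    simp [h1, h3]

lemma pv_sorted2_eq (xs ys : List (Nat × Nat)) (hperm : ys.Perm xs)
    (hpw : ys.Pairwise pvLexLt) :
    PySem.List.sorted2 xs Prod.fst Prod.snd = ys := by
  have hbef : (fun (a b : Nat × Nat) =>
      (decide (a.1 < b.1) || (!decide (b.1 < a.1) && decide (a.2 < b.2)))) =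
      fun a b => decide (toLex a < toLex b) := by
    funext a b
    have hiff : (toLex a < toLex b) ↔ (a.1 < b.1 ∨ (a.1 = b.1 ∧ a.2 < b.2)) := Prod.Lex.lt_iff
    rw [show (decide (toLex a < toLex b)) = decide (a.1 < b.1 ∨ (a.1 = b.1 ∧ a.2 < b.2)) from
      decide_eq_decide.mpr hiff]
    by_cases h1 : a.1 < b.1
    · simp [h1]
    · by_cases h2 : b.1 < a.1
      · simp [h1, h2, show ¬ a.1 = b.1 by omega]
      · by_cases h3 : a.2 < b.2
        · simp [h3, show a.1 = b.1 by omega]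
        · simp [h1, h2, h3]
  have hs : PySem.List.sorted2 xs Prod.fst Prod.snd =
      xs.foldl (fun acc x =>
        PySem.List.insertBy (fun a b => decide (toLex a < toLex b)) x acc) [] := by
    unfold PySem.List.sorted2
    simp only [if_neg (by simp : ¬ (false = true))]
    rw [hbef]
  rw [hs]
  have hsorted : ∀ zs : List (Nat × Nat), (zs.foldl (fun acc x =>
      PySem.List.insertBy (fun a b => decide (toLex a < toLex b)) x acc) []).Pairwise
      (fun a b => toLex a ≤ toLex b) := by
    intro zs
    induction zs using List.reverseRecOn with
    | nil => simp
    | append_singleton t x ih =>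
      rw [List.foldl_append, List.foldl_cons, List.foldl_nil]
      exact PySem.List.insertBy_pairwise_le (fun p => toLex p) x _ ih
  apply List.eq_of_perm_of_sorted (le := fun a b => toLex a ≤ toLex b)
  · intro a b _ _ hab hba
    exact toLex.injective (le_antisymm hab hba)
  · exact hsorted xs
  · apply hpw.imp
    intro a b hab
    apply le_of_lt
    rw [Prod.Lex.lt_iff]
    exact hab
  · rw [← hs]
    exact (PySem.List.sorted2_perm xs Prod.fst Prod.snd false).trans hperm.symm

lemma pv_keys_getD (ng : List (String × List (String × List Int))) (t : Nat) :
    (ng.map Prod.fst).getD t "" = pvKey ng t := by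
  by_cases h : t < ng.length
  · rw [pv_getD_lt _ _ t (by simpa), pvKey, pvEntry, pv_getD_lt _ _ t h]
    simp
  · rw [List.getD_eq_getElem?_getD, List.getElem?_eq_none (by simpa using h), pvKey, pvEntry,
      List.getD_eq_getElem?_getD, List.getElem?_eq_none (by omega)]
    rfl

lemma pvB_eq_fold (ng : List (String × List (String × List Int))) :
    build_node_groups_links_alt ng = ((pvLexShare ng).foldl (pvEmit ng) pvSt0).2 := by
  obtain ⟨hk, hnd, hgd⟩ := pvOuter ng 0 [] (PySem.Dict.mk [])
    (by intro m x hx; simp [PySem.Dict.getD, PySem.Dict.get?] at hx)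
    (by simp [PySem.Dict.keys])
  have hbucket : ∀ m : Int,
      ((ng.foldl pvGstep (0, [], PySem.Dict.mk [])).2.2).getD m [] =
        (List.range ng.length).filter (fun t => decide (m ∈ pvMems ng t)) := by
    intro m
    rw [hgd m]
    simp [pvMems, pvEntry, PySem.Dict.getD, PySem.Dict.get?]
  have hbucket_pw : ∀ m : Int,
      (((ng.foldl pvGstep (0, [], PySem.Dict.mk [])).2.2).getD m []).Pairwise (· < ·) := by
    intro m
    rw [hbucket m]
    exact List.pairwise_lt_range.filter _
  -- membership in the candidate-pair set
  have hpairs_mem : ∀ ij : Nat × Nat,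
      ij ∈ (PySem.Dict.values (ng.foldl pvGstep (0, [], PySem.Dict.mk [])).2.2).foldl pvAddPairs
          (PySem.Set.empty : PySem.Set (Nat × Nat)) ↔
        ij.1 < ij.2 ∧ ij.2 < ng.length ∧ pvShareB ng ij.1 ij.2 = true := by
    intro ij
    have hshape : (PySem.Dict.values (ng.foldl pvGstep (0, [], PySem.Dict.mk [])).2.2).foldl
        pvAddPairs (PySem.Set.empty : PySem.Set (Nat × Nat)) =
        (PySem.Dict.values (ng.foldl pvGstep (0, [], PySem.Dict.mk [])).2.2).foldl
          (fun s a => (PySem.List.combinations a 2).foldl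
            (fun s c =>
              PySem.Set.add s ((PySem.List.pyGet? c 0).getD 0, (PySem.List.pyGet? c 1).getD 0)) s)
          PySem.Set.empty := rfl
    rw [hshape, pv_mem_foldl_add2]
    constructor
    · rintro (habs | ⟨b, hb, c, hc, rfl⟩)
      · simp [PySem.Set.empty] at habs
      · -- b is some bucket of the index
        have hb' : b ∈ ((ng.foldl pvGstep (0, [], PySem.Dict.mk [])).2.2).items.map
            (fun p => p.2) := hb
        obtain ⟨⟨k1, v1⟩, hp, rfl⟩ := List.mem_map.1 hb'
        have hget := PySem.Dict.get?_of_mem_items _ hp hnd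
        have hbval : ((ng.foldl pvGstep (0, [], PySem.Dict.mk [])).2.2).getD k1 [] = v1 :=
          PySem.Dict.getD_of_get?_eq_some _ [] hget
        obtain ⟨hsub, hlen⟩ := (PySem.List.mem_combinations_iff _ _ _).1 hc
        obtain ⟨x, y, rfl⟩ := List.length_eq_two.1 hlen
        have hpw : v1.Pairwise (· < ·) := by
          rw [← hbval]; exact hbucket_pw k1
        obtain ⟨hx, hy, hxy⟩ := (pv_pair_sublist_iff hpw x y).1 hsub
        rw [← hbval, hbucket k1, List.mem_filter, List.mem_range] at hx hy
        have hfc : ((PySem.List.pyGet? [x, y] 0).getD 0, (PySem.List.pyGet? [x, y] 1).getD 0)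
            = (x, y) := by
          simp [PySem.List.pyGet?, PySem.List.pyIdx?]
        rw [hfc]
        refine ⟨hxy, hy.1, ?_⟩
        simp only [pvShareB, List.any_eq_true, List.contains_iff_mem]
        exact ⟨k1, by simpa using hx.2, by simpa using hy.2⟩
    · rintro ⟨h1, h2, h3⟩
      right
      simp only [pvShareB, List.any_eq_true, List.contains_iff_mem] at h3
      obtain ⟨m, hmi, hmj⟩ := h3
      have hi : ij.1 ∈ ((ng.foldl pvGstep (0, [], PySem.Dict.mk [])).2.2).getD m [] := by
        rw [hbucket m, List.mem_filter, List.mem_range]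
        exact ⟨by omega, by simpa using hmi⟩
      have hj : ij.2 ∈ ((ng.foldl pvGstep (0, [], PySem.Dict.mk [])).2.2).getD m [] := by
        rw [hbucket m, List.mem_filter, List.mem_range]
        exact ⟨h2, by simpa using hmj⟩
      have hcont : ((ng.foldl pvGstep (0, [], PySem.Dict.mk [])).2.2).contains m = true := by
        by_contra hc
        have hc' : ((ng.foldl pvGstep (0, [], PySem.Dict.mk [])).2.2).contains m = false :=
          Bool.eq_false_iff.2 hc
        have := PySem.Dict.getD_of_not_contains
          (d := (ng.foldl pvGstep (0, [], PySem.Dict.mk [])).2.2) (k := m) (d0 := []) hc'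
        rw [this] at hi
        simp at hi
      have hsome : ∃ v, ((ng.foldl pvGstep (0, [], PySem.Dict.mk [])).2.2).get? m = some v := by
        rw [PySem.Dict.contains_eq_isSome_get?] at hcont
        exact Option.isSome_iff_exists.1 hcont
      obtain ⟨v, hv⟩ := hsome
      have hveq : v = ((ng.foldl pvGstep (0, [], PySem.Dict.mk [])).2.2).getD m [] :=
        (PySem.Dict.getD_of_get?_eq_some _ [] hv).symm
      refine ⟨v, ?_, [ij.1, ij.2], ?_, ?_⟩
      · have hmem := PySem.Dict.mem_items_of_get?_eq_some _ hv
        simp only [PySem.Dict.values]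
        exact List.mem_map.2 ⟨(m, v), hmem, rfl⟩
      · rw [PySem.List.mem_combinations_iff]
        refine ⟨?_, rfl⟩
        rw [hveq]
        exact (pv_pair_sublist_iff (hbucket_pw m) ij.1 ij.2).2 ⟨hi, hj, h1⟩
      · simp [PySem.List.pyGet?, PySem.List.pyIdx?]
  -- the sorted candidate pairs are exactly the lex-ordered sharing pairs
  have hnodup : ((PySem.Dict.values (ng.foldl pvGstep (0, [], PySem.Dict.mk [])).2.2).foldl
      pvAddPairs (PySem.Set.empty : PySem.Set (Nat × Nat))).Nodup :=
    pv_addPairs_nodup _ _ (by simp [PySem.Set.empty])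
  have hlexnodup : (pvLexShare ng).Nodup := by
    apply (pv_lexShare_pairwise ng).imp
    intro a b hab
    rcases hab with h | h
    · intro he; subst he; omega
    · intro he; subst he; omega
  have hperm : (pvLexShare ng).Perm
      ((PySem.Dict.values (ng.foldl pvGstep (0, [], PySem.Dict.mk [])).2.2).foldl
        pvAddPairs (PySem.Set.empty : PySem.Set (Nat × Nat))) := by
    rw [List.perm_ext_iff_of_nodup hlexnodup hnodup]
    intro ij
    rw [hpairs_mem ij, pv_mem_lexShare ng ij]
  have hsorted : PySem.List.sorted2
      ((PySem.Dict.values (ng.foldl pvGstep (0, [], PySem.Dict.mk [])).2.2).foldl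
        pvAddPairs (PySem.Set.empty : PySem.Set (Nat × Nat))) Prod.fst Prod.snd = pvLexShare ng :=
    pv_sorted2_eq _ _ hperm (pv_lexShare_pairwise ng)
  -- assemble
  have hkeys : (ng.foldl pvGstep (0, [], PySem.Dict.mk [])).2.1 = ng.map Prod.fst := by
    simpa using hk
  have halt : build_node_groups_links_alt ng =
      ((PySem.List.sorted2
          ((PySem.Dict.values (ng.foldl pvGstep (0, [], PySem.Dict.mk [])).2.2).foldl
            pvAddPairs (PySem.Set.empty : PySem.Set (Nat × Nat))) Prod.fst Prod.snd).foldl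
        (fun st ij =>
          let left := ((ng.foldl pvGstep (0, [], PySem.Dict.mk [])).2.1).getD ij.1 ""
          let right := ((ng.foldl pvGstep (0, [], PySem.Dict.mk [])).2.1).getD ij.2 ""
          let left_right := left ++ " - " ++ right
          let right_left := right ++ " - " ++ left
          if !(PySem.Set.contains st.1 left_right) && !(PySem.Set.contains st.1 right_left) then
            (PySem.Set.add st.1 left_right, st.2 ++ [[("source", left), ("target", right)]])
          else st)
        ((PySem.Set.empty : PySem.Set String), ([] : List (List (String × String))))).2 := rfl
  rw [halt, hsorted]
  simp only [hkeys, pv_keys_getD]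
  rfl

-- ===== VERDICT (by name: the statement is the Claim_ definition above) =====
theorem build_node_groups_links_spec : Claim_equal_build_node_groups_links := by
  intro ng _ hpre
  unfold Spec_build_node_groups_links
  rw [pvB_eq_fold, pvA_eq_fold ng hpre.1]
  have h := (pvA_rows ng ng.length le_rfl).1
  rw [h]; rfl
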